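-- pv_equiv track=rewrite | github.com/sueszli/vector-database-benchmark | dataset/python-mutated/pywasmcross.py | _calculate_object_exports_readobj_parse
-- ===== SOURCE A (Python) =====
-- def _calculate_object_exports_readobj_parse(output: str) -> list[str]:
--     if False:
--         return 10
--     "\n    >>> _calculate_object_exports_readobj_parse(\n    ...     '''\n    ...     Format: WASM \\n Arch: wasm32 \\n AddressSize: 32bit\n    ...     Sections [\n    ...         Section { \\n Type: TYPE (0x1)   \\n Size: 5  \\n Offset: 8  \\n }\n    ...         Section { \\n Type: IMPORT (0x2) \\n Size: 32 \\n Offset: 19 \\n }\n    ...     ]\n    ...     Symbol {\n    ...         Name: g2 \\n Type: FUNCTION (0x0) \\n\n    ...         Flags [ (0x0) \\n ]\n    ...         ElementIndex: 0x2\n    ...     }\n    ...     Symbol {\n    ...         Name: f2 \\n Type: FUNCTION (0x0) \\n\n    ...         Flags [ (0x4) \\n VISIBILITY_HIDDEN (0x4) \\n ]\n    ...         ElementIndex: 0x1\n    ...     }\n    ...     Symbol {\n    ...         Name: l  \\n Type: FUNCTION (0x0)\n    ...         Flags [ (0x10)\\n UNDEFINED (0x10) \\n ]\n    ...         ImportModule: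 env\n    ...         ElementIndex: 0x0\n    ...     }\n    ...     '''\n    ... )\n    ['g2']\n    "
--     result = []
--     insymbol = False
--     for line in output.split('\n'):
--         line = line.strip()
--         if line == 'Symbol {':
--             insymbol = True
--             export = True
--             name = None
--             symbol_lines = [line]
--             continue
--         if not insymbol:
--             continue
--         symbol_lines.append(line)
--         if line.startswith('Name:'):
--             name = line.removeprefix('Name:').strip()
--         if line.startswith(('BINDING_LOCAL', 'UNDEFINED', 'VISIBILITY_HIDDEN')):
--             export = False
--         if line == '}':
--             insymbol = False
--             if export:
--                 if not name:
--                     raise RuntimeError("Didn't find symbol's name:\n" + '\n'.join(symbol_lines))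
--                 result.append(name)
--     return result
-- ===== SOURCE B (Python) =====
-- def _calculate_object_exports_readobj_parse(output: str) -> list[str]:
--     # Pass 1: cut the stripped lines into Symbol blocks.
--     blocks = []
--     cur = None
--     for line in output.split('\n'):
--         line = line.strip()
--         if line == 'Symbol {':
--             cur = [line]  # a nested 'Symbol {' restarts the block
--         elif cur is not None:
--             cur.append(line)
--             if line == '}':
--                 blocks.append(cur)
--                 cur = None
--     # Pass 2: extract the exported names from each completed block.
--     result = []
--     for block in blocks:
--         name = None
--         export = True
--         for line in block:
--             if line.startswith('Name:'):
--                 name = line.removeprefix('Name:').strip()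
--             if line.startswith(('BINDING_LOCAL', 'UNDEFINED', 'VISIBILITY_HIDDEN')):
--                 export = False
--         if export:
--             if not name:
--                 raise RuntimeError("Didn't find symbol's name:\n" + '\n'.join(block))
--             result.append(name)
--     return result
-- ===== Notes on version B (the rewrite author's own statement) =====
-- stated objective: alternative
-- what changed: A's single stateful loop (insymbol/export/name flags updated per line) is replaced by a two-pass decomposition: first cut the stripped lines into completed Symbol blocks, then extract the exported name from each block.
import Mathlib
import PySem

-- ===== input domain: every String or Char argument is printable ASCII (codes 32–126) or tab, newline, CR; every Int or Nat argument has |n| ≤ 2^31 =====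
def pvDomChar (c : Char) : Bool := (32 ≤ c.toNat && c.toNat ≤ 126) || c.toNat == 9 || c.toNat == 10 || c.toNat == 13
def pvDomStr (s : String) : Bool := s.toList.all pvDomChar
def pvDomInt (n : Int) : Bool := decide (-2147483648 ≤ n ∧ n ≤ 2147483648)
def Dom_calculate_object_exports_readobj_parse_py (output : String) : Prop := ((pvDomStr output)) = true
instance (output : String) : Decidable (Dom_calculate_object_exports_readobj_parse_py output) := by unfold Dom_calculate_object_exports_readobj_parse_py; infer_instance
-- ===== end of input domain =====

-- B replaces A's single stateful line loop by two passes (cut into Symbol blocks, then extract names);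
-- objective: alternative decomposition, same cost. Equality of the ports is proved on all inputs;
-- Pre_ only excludes the inputs on which the Python A raises RuntimeError (B raises the same error there).

-- line.removeprefix('Name:').strip()  — removeprefix ported by hand (guarded by startswith, so it is
-- exactly the 5-character drop; exact on the stated ASCII domain)
def pvNameOf (line : String) : String :=
  PySem.Str.strip (String.ofList (line.toList.drop 5))

-- line.startswith(('BINDING_LOCAL', 'UNDEFINED', 'VISIBILITY_HIDDEN'))
def pvIsHidden (line : String) : Bool :=
  PySem.Str.startswith line "BINDING_LOCAL" || PySem.Str.startswith line "UNDEFINED" ||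
    PySem.Str.startswith line "VISIBILITY_HIDDEN"

-- the close-of-block emission shared by both sources: 'if export: (raise if not name) else append'.
-- Where Python raises (export and falsy name) this totalization appends nothing; those inputs are outside Pre_.
def pvEmit (result : List String) (exp : Bool) (name : Option String) : List String :=
  if exp then
    match name with
    | none => result
    | some n => if n = "" then result else result ++ [n]
  else result

-- ===== PORT A =====
-- state = (result, insymbol, export, name, symbol_lines); initial export/name/symbol_lines are
-- never read before the first 'Symbol {' (insymbol is false), matching Python's unbound locals.
def pvAStep (st : List String × Bool × Bool × Option String × List String) (line0 : String) :
    List String × Bool × Bool × Option String × List String :=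
  match st with
  | (result, insymbol, exp, name, symlines) =>
    if PySem.Str.strip line0 = "Symbol {" then (result, true, true, none, ["Symbol {"])
    else if insymbol = false then (result, insymbol, exp, name, symlines)
    else
      if PySem.Str.strip line0 = "}" then
        (pvEmit result
            (if pvIsHidden (PySem.Str.strip line0) then false else exp)
            (if PySem.Str.startswith (PySem.Str.strip line0) "Name:" then some (pvNameOf (PySem.Str.strip line0)) else name),
          false,
          (if pvIsHidden (PySem.Str.strip line0) then false else exp),
          (if PySem.Str.startswith (PySem.Str.strip line0) "Name:" then some (pvNameOf (PySem.Str.strip line0)) else name),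
          symlines ++ [PySem.Str.strip line0])
      else
        (result, true,
          (if pvIsHidden (PySem.Str.strip line0) then false else exp),
          (if PySem.Str.startswith (PySem.Str.strip line0) "Name:" then some (pvNameOf (PySem.Str.strip line0)) else name),
          symlines ++ [PySem.Str.strip line0])

def calculate_object_exports_readobj_parse_py (output : String) : List String :=
  (((PySem.Str.split? output "\n").getD []).foldl pvAStep ([], false, true, none, [])).1

-- ===== PORT B =====
-- pass 1: cut the stripped lines into completed Symbol blocks (state = (blocks, current block))
def pvPass1Step (st : List (List String) × Option (List String)) (line0 : String) :
    List (List String) × Option (List String) :=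
  match st with
  | (blocks, cur) =>
    if PySem.Str.strip line0 = "Symbol {" then (blocks, some ["Symbol {"])
    else
      match cur with
      | none => (blocks, none)
      | some c =>
        if PySem.Str.strip line0 = "}" then (blocks ++ [c ++ [PySem.Str.strip line0]], none)
        else (blocks, some (c ++ [PySem.Str.strip line0]))

-- pass 2 inner loop over one block: (name, exp)
def pvScanStep (st : Option String × Bool) (line : String) : Option String × Bool :=
  ((if PySem.Str.startswith line "Name:" then some (pvNameOf line) else st.1),
   (if pvIsHidden line then false else st.2))

def pvScanBlock (block : List String) : Option String × Bool :=
  block.foldl pvScanStep (none, true)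

def pvProcBlock (result : List String) (block : List String) : List String :=
  pvEmit result (pvScanBlock block).2 (pvScanBlock block).1

def calculate_object_exports_readobj_parse_py_alt (output : String) : List String :=
  ((((PySem.Str.split? output "\n").getD []).foldl pvPass1Step ([], none)).1).foldl pvProcBlock []

-- ===== PRECONDITION & SPEC =====
def pvLines (output : String) : List String :=
  ((PySem.Str.split? output "\n").getD []).map PySem.Str.strip

-- Pre_ excludes exactly the inputs on which the Python A raises RuntimeError (a completed Symbol
-- block that is exported — no hidden/undefined/local flag — but whose last name line is missing
-- or empty); the Python B raises the identical RuntimeError there, so nothing returnable is excluded.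
def Pre_calculate_object_exports_readobj_parse_py (output : String) : Prop :=
  ∀ j ∈ List.range (pvLines output).length, ∀ i ∈ List.range j,
    ((pvLines output)[i]! = "Symbol {" ∧ (pvLines output)[j]! = "}" ∧
      ∀ k ∈ List.range j, i < k → ((pvLines output)[k]! ≠ "Symbol {" ∧ (pvLines output)[k]! ≠ "}")) →
    ((∃ k ∈ List.range j, i < k ∧ pvIsHidden (pvLines output)[k]! = true) ∨
     (∃ k ∈ List.range j, i < k ∧ PySem.Str.startswith (pvLines output)[k]! "Name:" = true ∧
        pvNameOf (pvLines output)[k]! ≠ "" ∧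
        ∀ m ∈ List.range j, k < m → PySem.Str.startswith (pvLines output)[m]! "Name:" = false))

instance (output : String) : Decidable (Pre_calculate_object_exports_readobj_parse_py output) := by
  unfold Pre_calculate_object_exports_readobj_parse_py; infer_instance

def pvWitness_calculate_object_exports_readobj_parse_py : String := "Symbol {\nName: g2\n}\nother"

def Spec_calculate_object_exports_readobj_parse_py (output : String) (out : List String) : Prop := out = calculate_object_exports_readobj_parse_py_alt output
instance (output : String) (out : List String) : Decidable (Spec_calculate_object_exports_readobj_parse_py output out) := by unfold Spec_calculate_object_exports_readobj_parse_py; infer_instance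

-- ===== CLAIM (what is proved, stated in full; the proofs are below) =====
def Claim_equal_calculate_object_exports_readobj_parse_py : Prop := ∀ (output : String), Dom_calculate_object_exports_readobj_parse_py output → Pre_calculate_object_exports_readobj_parse_py output → Spec_calculate_object_exports_readobj_parse_py output (calculate_object_exports_readobj_parse_py output)

-- ===== LEMMAS AND PROOFS =====

-- loop invariant relating A's running state to B's pass-1 state: whenever A is inside a symbol,
-- B's current block is A's symbol_lines and A's (name, exp) is its scan; A's result is the
-- processing of B's completed blocks.
theorem pv_inv (lines : List String) :
    ∀ (result : List String) (insymbol exp : Bool) (name : Option String)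
      (symlines : List String) (blocks : List (List String)) (cur : Option (List String)),
      (insymbol = true → cur = some symlines ∧ pvScanBlock symlines = (name, exp)) →
      (insymbol = false → cur = none) →
      result = blocks.foldl pvProcBlock [] →
      ((lines.foldl pvAStep (result, insymbol, exp, name, symlines)).1
        = ((lines.foldl pvPass1Step (blocks, cur)).1).foldl pvProcBlock []) := by
  induction lines with
  | nil => intro result insymbol exp name symlines blocks cur _ _ hres; simpa using hres
  | cons l ls ih =>
    intro result insymbol exp name symlines blocks cur h1 h0 hres
    simp only [List.foldl_cons]
    by_cases hS : PySem.Str.strip l = "Symbol {"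
    · simp only [pvAStep, pvPass1Step, hS, if_true]
      exact ih result true true none ["Symbol {"] blocks (some ["Symbol {"])
        (fun _ => ⟨rfl, by decide⟩) (fun h => nomatch h) hres
    · cases insymbol with
      | false =>
        have hc : cur = none := h0 rfl
        simp only [pvAStep, pvPass1Step, hS, hc, reduceIte]
        exact ih result false exp name symlines blocks none (fun h => nomatch h) (fun _ => rfl) hres
      | true =>
        obtain ⟨hc, hscan⟩ := h1 rfl
        simp only [pvScanBlock] at hscan
        have hstep : pvScanBlock (symlines ++ [PySem.Str.strip l])
            = pvScanStep (name, exp) (PySem.Str.strip l) := by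
          simp only [pvScanBlock, List.foldl_append, List.foldl_cons, List.foldl_nil, hscan]
        by_cases hC : PySem.Str.strip l = "}"
        · simp only [pvAStep, pvPass1Step, hc, hC, reduceIte]
          refine ih _ false _ _ _ (blocks ++ [symlines ++ ["}"]]) none
            (fun h => nomatch h) (fun _ => rfl) ?_
          simp only [List.foldl_append, List.foldl_cons, List.foldl_nil]
          rw [← hres]
          rw [hC] at hstep
          simp only [pvProcBlock, hstep, pvScanStep]
        · simp only [pvAStep, pvPass1Step, hS, hc, hC, reduceIte]
          refine ih result true _ _ (symlines ++ [PySem.Str.strip l]) blocks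
            (some (symlines ++ [PySem.Str.strip l]))
            (fun _ => ⟨rfl, ?_⟩) (fun h => nomatch h) hres
          rw [hstep]; rfl

theorem pv_ports_eq (output : String) :
    calculate_object_exports_readobj_parse_py output
      = calculate_object_exports_readobj_parse_py_alt output := by
  unfold calculate_object_exports_readobj_parse_py calculate_object_exports_readobj_parse_py_alt
  exact pv_inv _ [] false true none [] [] none (by intro h; cases h) (fun _ => rfl) rfl

-- ===== VERDICT (by name: the statement is the Claim_ definition above) =====
theorem calculate_object_exports_readobj_parse_py_spec : Claim_equal_calculate_object_exports_readobj_parse_py := by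
  intro output _ _
  unfold Spec_calculate_object_exports_readobj_parse_py
  exact pv_ports_eq output
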